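-- pv_equiv track=rewrite | github.com/JiaMa-SJSU/coding-exercise | log_query.py | gen_ip
-- ===== SOURCE A (Python) =====
-- def gen_ip(count):
--     cnt = 0
--     assert count < 255 * 254
--
--     for i in range(254):
--         for j in range(1, 255):
--             if cnt < count:
--                 cnt += 1
--                 yield "192.168.%d.%d" % (i, j)
-- ===== SOURCE B (Python) =====
-- def gen_ip(count):
--     for k in range(min(count, 254 * 254)):
--         yield "192.168.%d.%d" % (k // 254, k % 254 + 1)
-- ===== Notes on version B (the rewrite author's own statement) =====
-- stated objective: alternative
-- what changed: Replaces the fixed 254x254 nested loop with a guard counter by a single range(min(count,254*254)) loop that computes the octets of the k-th IP directly with k//254 and k%254+1 (work proportional to count instead of always 64516 iterations).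
import Mathlib
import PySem

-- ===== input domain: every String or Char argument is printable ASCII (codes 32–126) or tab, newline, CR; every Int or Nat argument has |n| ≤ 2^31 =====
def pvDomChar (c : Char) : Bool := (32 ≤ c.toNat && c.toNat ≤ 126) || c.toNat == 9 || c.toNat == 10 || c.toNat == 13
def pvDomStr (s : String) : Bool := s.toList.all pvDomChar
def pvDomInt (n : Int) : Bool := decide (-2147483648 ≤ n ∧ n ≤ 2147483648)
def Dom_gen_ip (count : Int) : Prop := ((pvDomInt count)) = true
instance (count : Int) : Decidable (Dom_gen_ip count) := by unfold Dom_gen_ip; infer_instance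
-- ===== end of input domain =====

-- B iterates k over range(min(count, 254*254)) and computes each IP's octets directly
-- with k // 254 and k % 254 + 1, instead of A's fixed 254×254 nested loop with a counter guard.

-- shared formatting helper: "192.168.%d.%d" % (i, j)
def ipStr (i j : Int) : String :=
  "192.168." ++ PySem.Int.toStr i ++ "." ++ PySem.Int.toStr j

-- ===== PORT A =====
-- inner loop 'for j in range(1, 255)' of A, over state (yielded list, cnt)
def rowFold (count : Int) (i : Int) (s : List String × Int) : List String × Int :=
  (PySem.List.pyRange 1 255 1).foldl
    (fun s j => if s.2 < count then (s.1 ++ [ipStr i j], s.2 + 1) else s) s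

def gen_ip (count : Int) : List String :=
  ((PySem.List.pyRange 0 254 1).foldl (fun s i => rowFold count i s)
    (([] : List String), (0 : Int))).1

-- ===== PORT B =====
def gen_ip_alt (count : Int) : List String :=
  (PySem.List.pyRange 0 (min count (254 * 254)) 1).map
    (fun k => ipStr (PySem.Int.floordiv k 254) (PySem.Int.mod k 254 + 1))

-- ===== PRECONDITION & SPEC =====
-- A's 'assert count < 255 * 254' raises AssertionError for count ≥ 64770; exactly those inputs are excluded.
def Pre_gen_ip (count : Int) : Prop := count < 255 * 254
instance (count : Int) : Decidable (Pre_gen_ip count) := by unfold Pre_gen_ip; infer_instance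
def pvWitness_gen_ip : Int := (300)

def Spec_gen_ip (count : Int) (out : List String) : Prop := out = gen_ip_alt count
instance (count : Int) (out : List String) : Decidable (Spec_gen_ip count out) := by unfold Spec_gen_ip; infer_instance

-- ===== CLAIM (what is proved, stated in full; the proofs are below) =====
def Claim_equal_gen_ip : Prop := ∀ (count : Int), Dom_gen_ip count → Pre_gen_ip count → Spec_gen_ip count (gen_ip count)

-- ===== LEMMAS AND PROOFS =====

-- the first n IPs, indexed directly (the common normal form of both ports)
def mapF (n : Nat) : List String :=
  (List.range n).map
    (fun k : Nat => ipStr (PySem.Int.floordiv (k : Int) 254) (PySem.Int.mod (k : Int) 254 + 1))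

lemma mapF_succ (n : Nat) :
    mapF (n + 1)
      = mapF n ++ [ipStr (PySem.Int.floordiv (n : Int) 254) (PySem.Int.mod (n : Int) 254 + 1)] := by
  simp [mapF, List.range_succ]

-- the appended string at pair index M = i*254 + (j-1) is the M-th IP
lemma ipStr_eq (i j M : Int) (hi : 0 ≤ i) (hj : 1 ≤ j) (hj' : j < 255)
    (hM : M = i * 254 + (j - 1)) :
    ipStr i j = ipStr (PySem.Int.floordiv M 254) (PySem.Int.mod M 254 + 1) := by
  have hdiv : PySem.Int.floordiv M 254 = i :=
    (PySem.Int.floordiv_eq_iff_of_pos (by norm_num)).mpr ⟨by omega, by omega⟩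
  have hmm := PySem.Int.floordiv_mul_add_mod M 254
  rw [hdiv] at hmm
  have hmod : PySem.Int.mod M 254 = j - 1 := by omega
  rw [hdiv, hmod]
  norm_num

-- inner loop: processing columns j = 255-t .. 254 of row i keeps the state in normal form
lemma inner_lem (c i : Int) (hi0 : 0 ≤ i) :
    ∀ t : Nat, t ≤ 254 → ∀ M : Int, M = min (max c 0) (i * 254 + (254 - t)) →
    (PySem.List.pyRange (255 - (t : Int)) 255 1).foldl
        (fun s j => if s.2 < c then (s.1 ++ [ipStr i j], s.2 + 1) else s)
        (mapF M.toNat, M)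
      = (mapF (min (max c 0) (i * 254 + 254)).toNat, min (max c 0) (i * 254 + 254)) := by
  intro t
  induction t with
  | zero =>
    intro _ M hM
    rw [PySem.List.pyRange_one_eq_nil (by norm_num)]
    simp only [List.foldl_nil]
    have : M = min (max c 0) (i * 254 + 254) := by omega
    rw [this]
  | succ t ih =>
    intro ht M hM
    have ht' : t ≤ 254 := by omega
    rw [show (255 - ((t : Nat) + 1 : Nat) : Int) = 254 - t by push_cast; ring,
        PySem.List.pyRange_one_cons (by omega)]
    simp only [List.foldl_cons]
    have hM0 : 0 ≤ M := by omega
    by_cases hc : M < c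
    · simp only [if_pos hc]
      have hMeq : M = i * 254 + (253 - t) := by omega
      have hstr : ipStr i (254 - t)
          = ipStr (PySem.Int.floordiv M 254) (PySem.Int.mod M 254 + 1) :=
        ipStr_eq i (254 - t) M hi0 (by omega) (by omega) (by omega)
      have hfst : mapF M.toNat ++ [ipStr i (254 - (t : Int))]
          = mapF (M + 1).toNat := by
        rw [hstr, show (M + 1).toNat = M.toNat + 1 by omega, mapF_succ,
            show ((M.toNat : Int)) = M by omega]
      rw [show (254 - (t : Int) + 1) = 255 - t by ring, hfst]
      exact ih ht' (M + 1) (by omega)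
    · simp only [if_neg hc]
      rw [show (254 - (t : Int) + 1) = 255 - t by ring]
      exact ih ht' M (by omega)

-- outer loop: processing rows i = 254-t .. 253 keeps the state in normal form
lemma outer_lem (c : Int) :
    ∀ t : Nat, t ≤ 254 → ∀ M : Int, M = min (max c 0) ((254 - t) * 254) →
    (PySem.List.pyRange (254 - (t : Int)) 254 1).foldl
        (fun s i => rowFold c i s) (mapF M.toNat, M)
      = (mapF (min (max c 0) (254 * 254)).toNat, min (max c 0) (254 * 254)) := by
  intro t
  induction t with
  | zero =>
    intro _ M hM
    rw [PySem.List.pyRange_one_eq_nil (by norm_num)]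
    simp only [List.foldl_nil]
    have : M = min (max c 0) (254 * 254) := by omega
    rw [this]
  | succ t ih =>
    intro ht M hM
    have ht' : t ≤ 254 := by omega
    rw [show (254 - ((t : Nat) + 1 : Nat) : Int) = 253 - t by push_cast; ring,
        PySem.List.pyRange_one_cons (by omega)]
    simp only [List.foldl_cons]
    have hrow := inner_lem c (253 - t) (by omega) 254 (by norm_num) M
      (by push_cast; omega)
    rw [show ((255 : Int) - (254 : Nat)) = 1 by norm_num] at hrow
    rw [rowFold, hrow]
    rw [show (253 - (t : Int) + 1) = 254 - t by ring]
    exact ih ht' (min (max c 0) ((253 - t) * 254 + 254)) (by omega)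

-- ===== VERDICT (by name: the statement is the Claim_ definition above) =====
theorem gen_ip_spec : Claim_equal_gen_ip := by
  intro c _ _
  unfold Spec_gen_ip gen_ip gen_ip_alt
  have h := outer_lem c 254 (le_refl _) 0 (by norm_num)
  rw [show ((254 : Int) - (254 : Nat)) = 0 by norm_num] at h
  have h0 : mapF (0 : Int).toNat = [] := by simp [mapF]
  rw [h0] at h
  rw [h]
  rw [PySem.List.pyRange_one]
  have hn : (min c (254 * 254) - 0).toNat = (min (max c 0) (254 * 254)).toNat := by omega
  rw [hn]
  unfold mapF
  rw [List.map_map]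
  apply List.map_congr_left
  intro k _
  norm_num
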